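-- pv_equiv track=rewrite | github.com/RoboticsLabURJC/2022-tfg-alejandro-moncalvillo | dl_car_control/holonomic/balance_dataset.py | max_index_two
-- ===== SOURCE A (Python) =====
-- def max_index_two(data):
--     mx = max(data[0], data[1])
--     secondmax = min(data[0], data[1])
--     n = len(data)
--     for i in range(2,n):
--         if data[i] > mx:
--             secondmax = mx
--             mx = data[i]
--         elif data[i] > secondmax and mx != data[i]:
--             secondmax = data[i]
--         elif mx == secondmax and secondmax != data[i]:
--             secondmax = data[i]
--
--     index_list = [-1,-1]
--
--     for j in range(n):
--         if data[j] == mx: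
--             index_list[0] = j
--         if data[j] == secondmax:
--             index_list[1] = j
--
--     return index_list
-- ===== SOURCE B (Python) =====
-- def max_index_two(data):
--     mx = max(data)
--     below = [v for v in data if v < mx]
--     secondmax = max(below) if below else mx
--     rev = list(reversed(data))
--     n = len(data)
--     return [n - 1 - rev.index(mx), n - 1 - rev.index(secondmax)]
-- ===== Notes on version B (the rewrite author's own statement) =====
-- stated objective: simpler
-- what changed: Replaces A's incremental three-branch second-max tracking loop and the forward last-match index loop by closed-form computations: mx = max(data), secondmax = max of the values strictly below mx (mx itself if none), and each index found as a single search in the reversed list.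
-- outside the precondition, e.g. on max_index_two([0]): A raises IndexError, B returns [0, 0]; on max_index_two([1]): A raises IndexError, B returns [0, 0]; on max_index_two([]): A raises IndexError, B raises ValueError
import Mathlib
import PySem

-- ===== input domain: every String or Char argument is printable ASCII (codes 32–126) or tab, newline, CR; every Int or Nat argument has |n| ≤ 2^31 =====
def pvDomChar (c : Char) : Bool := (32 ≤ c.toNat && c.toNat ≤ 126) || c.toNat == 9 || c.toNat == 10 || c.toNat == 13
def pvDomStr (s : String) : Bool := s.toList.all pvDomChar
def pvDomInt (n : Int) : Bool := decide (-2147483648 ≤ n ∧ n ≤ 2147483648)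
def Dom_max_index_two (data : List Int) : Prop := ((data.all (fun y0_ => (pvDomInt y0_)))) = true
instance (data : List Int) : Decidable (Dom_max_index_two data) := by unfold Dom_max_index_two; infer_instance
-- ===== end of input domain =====

-- B is simpler: closed-form max / second-max (the max of the values strictly below the max) and a
-- single reverse-search per index, instead of A's incremental tracking loop and last-match loop.

-- ===== PORT A =====
-- the body of A's first loop: reads di = data[i], updates (mx, secondmax)
def stepA (p : Int × Int) (di : Int) : Int × Int :=
  if di > p.1 then (di, p.1)
  else if di > p.2 ∧ p.1 ≠ di then (p.1, di)
  else if p.1 = p.2 ∧ p.2 ≠ di then (p.1, di)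
  else p

def max_index_two (data : List Int) : List Int :=
  let mx := max (PySem.List.pyGetD data 0 0) (PySem.List.pyGetD data 1 0)
  let secondmax := min (PySem.List.pyGetD data 0 0) (PySem.List.pyGetD data 1 0)
  let n : Int := data.length
  let ms := (PySem.List.pyRange 2 n 1).foldl
      (fun p i => stepA p (PySem.List.pyGetD data i 0)) (mx, secondmax)
  let il := (PySem.List.pyRange 0 n 1).foldl
      (fun (il : Int × Int) j =>
        (if PySem.List.pyGetD data j 0 = ms.1 then j else il.1,
         if PySem.List.pyGetD data j 0 = ms.2 then j else il.2)) (-1, -1)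
  [il.1, il.2]

-- ===== PORT B =====
def max_index_two_alt (data : List Int) : List Int :=
  let mx := (PySem.List.max? data (fun y => y)).getD 0       -- max(data); data ≠ [] under Pre_
  let below := data.filter (fun v => decide (v < mx))
  let secondmax := if below.isEmpty then mx
                   else (PySem.List.max? below (fun y => y)).getD 0
  let rev := data.reverse
  let n : Int := data.length
  [n - 1 - ((PySem.List.index? rev mx).getD 0 : Int),
   n - 1 - ((PySem.List.index? rev secondmax).getD 0 : Int)]

-- ===== PRECONDITION & SPEC =====
-- A reads data[0] and data[1] unconditionally, so it raises IndexError on lists of length < 2.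
def Pre_max_index_two (data : List Int) : Prop := 2 ≤ data.length
instance (data : List Int) : Decidable (Pre_max_index_two data) := by unfold Pre_max_index_two; infer_instance
def pvWitness_max_index_two : List Int := [3, 1, 3, 2]

def Spec_max_index_two (data : List Int) (out : List Int) : Prop := out = max_index_two_alt data
instance (data : List Int) (out : List Int) : Decidable (Spec_max_index_two data out) := by unfold Spec_max_index_two; infer_instance

-- ===== CLAIM (what is proved, stated in full; the proofs are below) =====
def Claim_equal_max_index_two : Prop := ∀ (data : List Int), Dom_max_index_two data → Pre_max_index_two data → Spec_max_index_two data (max_index_two data)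

-- ===== LEMMAS AND PROOFS =====

-- B's two closed forms, as proof-side names (definitionally the values B computes)
def maxOf (l : List Int) : Int := (PySem.List.max? l (fun y => y)).getD 0
def secOf (l : List Int) : Int :=
  let b := l.filter (fun v => decide (v < maxOf l))
  if b.isEmpty then maxOf l else (PySem.List.max? b (fun y => y)).getD 0

theorem maxOf_cons (a : Int) (t : List Int) : maxOf (a :: t) = t.foldl max a := by
  simp [maxOf, PySem.List.max?_id_cons]

theorem le_maxOf (l : List Int) (h : l ≠ []) : ∀ v ∈ l, v ≤ maxOf l := by
  cases l with
  | nil => simp at h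
  | cons a t =>
    intro v hv
    rw [maxOf_cons]
    rcases List.mem_cons.mp hv with rfl | hv
    · exact (PySem.List.le_foldl_max t v).1
    · exact (PySem.List.le_foldl_max t a).2 v hv

theorem maxOf_mem (l : List Int) (h : l ≠ []) : maxOf l ∈ l := by
  cases l with
  | nil => simp at h
  | cons a t =>
    rw [maxOf_cons]
    rcases PySem.List.foldl_max_mem t a with h1 | h1
    · rw [h1]; exact List.mem_cons_self
    · exact List.mem_cons_of_mem a h1

theorem maxOf_snoc (l : List Int) (x : Int) (h : l ≠ []) :
    maxOf (l ++ [x]) = max (maxOf l) x := by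
  cases l with
  | nil => simp at h
  | cons a t =>
    rw [List.cons_append, maxOf_cons, maxOf_cons, List.foldl_append]
    rfl

theorem secOf_of_empty (l : List Int) (hb : l.filter (fun v => decide (v < maxOf l)) = []) :
    secOf l = maxOf l := by
  unfold secOf; simp [hb]

theorem secOf_of_ne (l : List Int) (hb : l.filter (fun v => decide (v < maxOf l)) ≠ []) :
    secOf l = maxOf (l.filter (fun v => decide (v < maxOf l))) := by
  unfold secOf
  rw [if_neg (by simpa [List.isEmpty_iff] using hb)]
  rfl

theorem secOf_lt_of_ne (l : List Int) (hb : l.filter (fun v => decide (v < maxOf l)) ≠ []) :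
    secOf l < maxOf l := by
  rw [secOf_of_ne l hb]
  have hm := maxOf_mem _ hb
  have := List.of_mem_filter hm
  simpa using this

theorem secOf_mem (l : List Int) (h : l ≠ []) : secOf l ∈ l := by
  by_cases hb : l.filter (fun v => decide (v < maxOf l)) = []
  · rw [secOf_of_empty _ hb]; exact maxOf_mem l h
  · rw [secOf_of_ne _ hb]
    exact List.mem_of_mem_filter (maxOf_mem _ hb)

theorem maxOf_two (d0 d1 : Int) : maxOf [d0, d1] = max d0 d1 := by
  rw [maxOf_cons]; rfl

theorem secOf_two (d0 d1 : Int) : secOf [d0, d1] = min d0 d1 := by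
  rcases lt_trichotomy d0 d1 with h | h | h
  · have hb : [d0, d1].filter (fun v => decide (v < maxOf [d0, d1])) = [d0] := by
      rw [maxOf_two, max_eq_right h.le]
      simp [List.filter, h]
    rw [secOf_of_ne _ (by rw [hb]; simp), hb, maxOf_cons]
    simp
    exact h.le
  · subst h
    have hb : [d0, d0].filter (fun v => decide (v < maxOf [d0, d0])) = [] := by
      rw [maxOf_two]; simp
    rw [secOf_of_empty _ hb, maxOf_two]
    simp
  · have hb : [d0, d1].filter (fun v => decide (v < maxOf [d0, d1])) = [d1] := by
      rw [maxOf_two, max_eq_left h.le]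
      simp [List.filter, h]
    rw [secOf_of_ne _ (by rw [hb]; simp), hb, maxOf_cons]
    simp
    exact h.le

-- A's loop body applied to the (max, second-max) of a prefix P yields those of P ++ [x]
theorem stepA_spec (P : List Int) (x : Int) (h : P ≠ []) :
    stepA (maxOf P, secOf P) x = (maxOf (P ++ [x]), secOf (P ++ [x])) := by
  have hM := le_maxOf P h
  have hsnoc := maxOf_snoc P x h
  unfold stepA
  simp only []
  by_cases hx : x > maxOf P
  · -- new max
    rw [if_pos hx]
    have hM' : maxOf (P ++ [x]) = x := by rw [hsnoc]; exact max_eq_right (le_of_lt hx)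
    have hfilt : (P ++ [x]).filter (fun v => decide (v < maxOf (P ++ [x]))) = P := by
      rw [hM', List.filter_append, List.filter_singleton]
      have : P.filter (fun v => decide (v < x)) = P :=
        List.filter_eq_self.mpr (fun a ha => by simpa using lt_of_le_of_lt (hM a ha) hx)
      simp [this]
    have hs' : secOf (P ++ [x]) = maxOf P := by
      rw [secOf_of_ne _ (by rw [hfilt]; exact h), hfilt]
    rw [hM', hs']
  · -- x ≤ maxOf P
    push Not at hx
    have hM' : maxOf (P ++ [x]) = maxOf P := by rw [hsnoc]; exact max_eq_left hx
    rw [if_neg (by omega)]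
    by_cases h2 : x > secOf P ∧ maxOf P ≠ x
    · -- second branch fires: x < maxOf P, x > secOf P
      rw [if_pos h2]
      have hxlt : x < maxOf P := lt_of_le_of_ne hx (Ne.symm h2.2)
      have hfilt : (P ++ [x]).filter (fun v => decide (v < maxOf (P ++ [x])))
          = P.filter (fun v => decide (v < maxOf P)) ++ [x] := by
        rw [hM', List.filter_append, List.filter_singleton]
        simp [hxlt]
      have hs' : secOf (P ++ [x]) = x := by
        rw [secOf_of_ne _ (by rw [hfilt]; simp), hfilt]
        cases hb : P.filter (fun v => decide (v < maxOf P)) with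
        | nil => simp [maxOf, PySem.List.max?_id_cons]
        | cons c t =>
          rw [← hb, maxOf_snoc _ _ (by rw [hb]; simp)]
          have : secOf P = maxOf (P.filter (fun v => decide (v < maxOf P))) :=
            secOf_of_ne _ (by rw [hb]; simp)
          rw [← this]
          exact max_eq_right (le_of_lt h2.1)
      rw [hM', hs']
    · rw [if_neg h2]
      by_cases h3 : maxOf P = secOf P ∧ secOf P ≠ x
      · -- third branch: no element of P is below maxOf P, and x < maxOf P
        rw [if_pos h3]
        have hb : P.filter (fun v => decide (v < maxOf P)) = [] := by
          by_contra hne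
          exact absurd h3.1 (ne_of_gt (secOf_lt_of_ne P hne))
        have hxlt : x < maxOf P := by
          rcases lt_or_eq_of_le hx with h' | h'
          · exact h'
          · exact absurd (h' ▸ h3.1.symm) (by simpa [h'] using h3.2)
        have hfilt : (P ++ [x]).filter (fun v => decide (v < maxOf (P ++ [x]))) = [x] := by
          rw [hM', List.filter_append, List.filter_singleton, hb]
          simp [hxlt]
        have hs' : secOf (P ++ [x]) = x := by
          rw [secOf_of_ne _ (by rw [hfilt]; simp), hfilt]
          simp [maxOf, PySem.List.max?_id_cons]
        rw [hM', hs']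
      · -- no branch: (max, second-max) unchanged
        rw [if_neg h3]
        have hs' : secOf (P ++ [x]) = secOf P := by
          rcases eq_or_lt_of_le hx with hxe | hxlt
          · -- x = maxOf P : the filtered list is unchanged
            have hfilt : (P ++ [x]).filter (fun v => decide (v < maxOf (P ++ [x])))
                = P.filter (fun v => decide (v < maxOf P)) := by
              rw [hM', List.filter_append, List.filter_singleton]
              simp [hxe]
            cases hb : P.filter (fun v => decide (v < maxOf P)) with
            | nil => rw [secOf_of_empty _ (by rw [hfilt, hb]), secOf_of_empty _ hb, hM']
            | cons c t =>
              rw [secOf_of_ne _ (by rw [hfilt, hb]; simp), hfilt,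
                  secOf_of_ne _ (by rw [hb]; simp)]
          · -- x < maxOf P; then x ≤ secOf P and P has an element below maxOf P
            have hxs : x ≤ secOf P := by
              by_contra hgt
              push Not at hgt
              exact h2 ⟨hgt, ne_of_gt hxlt⟩
            have hbne : P.filter (fun v => decide (v < maxOf P)) ≠ [] := by
              intro hb
              have hms := secOf_of_empty P hb
              rcases eq_or_ne (secOf P) x with he | hne
              · omega
              · exact h3 ⟨hms.symm, hne⟩
            have hfilt : (P ++ [x]).filter (fun v => decide (v < maxOf (P ++ [x])))
                = P.filter (fun v => decide (v < maxOf P)) ++ [x] := by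
              rw [hM', List.filter_append, List.filter_singleton]
              simp [hxlt]
            rw [secOf_of_ne _ (by rw [hfilt]; simp), hfilt,
                maxOf_snoc _ _ hbne, ← secOf_of_ne _ hbne]
            exact max_eq_left hxs
        rw [hM', hs']

-- invariant for A's first loop
theorem foldA_spec (l P : List Int) (h : P ≠ []) :
    l.foldl stepA (maxOf P, secOf P) = (maxOf (P ++ l), secOf (P ++ l)) := by
  induction l generalizing P with
  | nil => simp
  | cons x t ih =>
    rw [List.foldl_cons, stepA_spec P x h, ih (P ++ [x]) (by simp)]
    simp

-- A's last-match index loop = search in the reversed list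
theorem lastIdx_spec (data : List Int) (v init : Int) :
    (PySem.List.pyRange 0 (data.length : Int) 1).foldl
      (fun acc j => if PySem.List.pyGetD data j 0 = v then j else acc) init
    = match PySem.List.index? data.reverse v with
      | some k => (data.length : Int) - 1 - (k : Int)
      | none => init := by
  induction data using List.reverseRecOn generalizing init with
  | nil => simp [PySem.List.pyRange_one_eq_nil]
  | append_singleton xs x ih =>
    have hlen : ((xs ++ [x]).length : Int) = (xs.length : Int) + 1 := by simp
    rw [hlen, PySem.List.pyRange_one_succ_right (by positivity), List.foldl_append]
    have hcong : ∀ (acc : Int), ∀ j ∈ PySem.List.pyRange 0 (xs.length : Int) 1,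
        (if PySem.List.pyGetD (xs ++ [x]) j 0 = v then j else acc)
        = (if PySem.List.pyGetD xs j 0 = v then j else acc) := by
      intro acc j hj
      rw [PySem.List.mem_pyRange_one] at hj
      have h1 : PySem.List.pyGetD (xs ++ [x]) j 0 = PySem.List.pyGetD xs j 0 := by
        rw [PySem.List.pyGetD_eq_getElem (xs ++ [x]) 0 hj.1 (by simp; omega),
            PySem.List.pyGetD_eq_getElem xs 0 hj.1 (by exact_mod_cast hj.2)]
        rw [List.getElem_append_left]
      rw [h1]
    rw [PySem.List.foldl_congr_mem _ _ _ _ hcong, ih]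
    have hx : PySem.List.pyGetD (xs ++ [x]) ((xs.length : Int)) 0 = x := by
      rw [PySem.List.pyGetD_eq_getElem (xs ++ [x]) 0 (by positivity) (by simp)]
      simp
    simp only [List.foldl_cons, List.foldl_nil, hx, List.reverse_append, List.reverse_singleton,
      List.singleton_append]
    by_cases hxv : x = v
    · subst hxv
      rw [PySem.List.index?_cons_self]
      simp
    · rw [PySem.List.index?_cons_of_ne _ hxv]
      cases h : PySem.List.index? xs.reverse v with
      | none => simp [hxv]
      | some k => simp [hxv]; ring

theorem main_spec (data : List Int) (hpre : 2 ≤ data.length) :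
    max_index_two data = max_index_two_alt data := by
  match data with
  | d0 :: d1 :: rest =>
  have hne : d0 :: d1 :: rest ≠ [] := by simp
  have hfold1 : (PySem.List.pyRange 2 ((d0 :: d1 :: rest).length : Int) 1).foldl
      (fun p i => stepA p (PySem.List.pyGetD (d0 :: d1 :: rest) i 0)) (max d0 d1, min d0 d1)
      = (maxOf (d0 :: d1 :: rest), secOf (d0 :: d1 :: rest)) := by
    rw [PySem.List.foldl_pyRange_pyGetD' (d0 :: d1 :: rest) 0 stepA _ (by omega : (0:Int) ≤ 2)]
    have hdrop : (d0 :: d1 :: rest).drop (2 : Int).toNat = rest := rfl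
    rw [hdrop]
    have h2 : ((max d0 d1 : Int), (min d0 d1 : Int)) = (maxOf [d0, d1], secOf [d0, d1]) := by
      rw [maxOf_two, secOf_two]
    rw [h2, foldA_spec rest [d0, d1] (by simp)]
    rfl
  have hmem1 : maxOf (d0 :: d1 :: rest) ∈ (d0 :: d1 :: rest).reverse := by
    exact List.mem_reverse.mpr (maxOf_mem _ hne)
  have hmem2 : secOf (d0 :: d1 :: rest) ∈ (d0 :: d1 :: rest).reverse := by
    exact List.mem_reverse.mpr (secOf_mem _ hne)
  obtain ⟨k1, hk1⟩ := Option.isSome_iff_exists.mp ((PySem.List.index?_isSome_iff _ _).mpr hmem1)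
  obtain ⟨k2, hk2⟩ := Option.isSome_iff_exists.mp ((PySem.List.index?_isSome_iff _ _).mpr hmem2)
  show max_index_two (d0 :: d1 :: rest) = max_index_two_alt (d0 :: d1 :: rest)
  unfold max_index_two max_index_two_alt
  simp only [PySem.List.pyGetD_ofNat', List.getD_cons_zero, List.getD_cons_succ]
  rw [hfold1]
  rw [PySem.List.foldl_prod_mk
        (f := fun acc j => if PySem.List.pyGetD (d0 :: d1 :: rest) j 0 = maxOf (d0 :: d1 :: rest) then j else acc)
        (g := fun acc j => if PySem.List.pyGetD (d0 :: d1 :: rest) j 0 = secOf (d0 :: d1 :: rest) then j else acc)]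
  rw [lastIdx_spec, lastIdx_spec, hk1, hk2]
  have hB1 : (PySem.List.max? (d0 :: d1 :: rest) (fun y => y)).getD 0 = maxOf (d0 :: d1 :: rest) := rfl
  have hB2 : (if ((d0 :: d1 :: rest).filter (fun v => decide (v < maxOf (d0 :: d1 :: rest)))).isEmpty
      then maxOf (d0 :: d1 :: rest)
      else (PySem.List.max? ((d0 :: d1 :: rest).filter (fun v => decide (v < maxOf (d0 :: d1 :: rest)))) (fun y => y)).getD 0)
      = secOf (d0 :: d1 :: rest) := rfl
  rw [hB1, hB2, hk1, hk2]
  simp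

-- ===== VERDICT (by name: the statement is the Claim_ definition above) =====
theorem max_index_two_spec : Claim_equal_max_index_two := by
  intro data _ hpre
  unfold Spec_max_index_two
  unfold Pre_max_index_two at hpre
  exact main_spec data hpre
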